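-- pv_equiv track=rewrite | github.com/weintried/lab02-pattern-tools | pattern_gen.py | check_maze_solvable
-- ===== SOURCE A (Python) =====
-- from collections import deque
--
-- def check_maze_solvable(maze):
--     """
--     Check if the maze is solvable under game rules:
--     - Start at (0,0) without a sword.
--     - Must collect a sword (cell value 2) before encountering a monster (cell value 3).
--     Returns True if there is a valid path from start to finish, otherwise False.
--     """
--     N = len(maze)
--     start = (0, 0)
--     finish = (N-1, N-1)
--     # State is (row, col, have_sword)
--     q = deque()
--     q.append((0, 0, False))
--     visited = set()
--     visited.add((0, 0, False))
--
--     while q: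
--         r, c, have_sword = q.popleft()
--         if (r, c) == finish:
--             return True
--         for dr, dc in [(0, 1), (1, 0), (0, -1), (-1, 0)]:
--             nr, nc = r + dr, c + dc
--             if 0 <= nr < N and 0 <= nc < N:
--                 cell = maze[nr][nc]
--                 new_have_sword = have_sword
--                 if cell == 1:  # wall
--                     continue
--                 elif cell == 2:  # sword: pick it up
--                     new_have_sword = True
--                 elif cell == 3:
--                     if not have_sword:
--                         continue
--                 state = (nr, nc, new_have_sword)
--                 if state not in visited:
--                     visited.add(state)
--                     q.append(state)
--     return False
-- ===== SOURCE B (Python) =====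
-- from collections import deque
--
-- def check_maze_solvable(maze):
--     """
--     Two-phase flood fill over grid positions instead of a search over
--     (row, col, sword) states: first the positions reachable from the start
--     while still sword-less (walls, swords and monsters all stop plain
--     movement), then the positions reachable after grabbing any reachable
--     sword (only walls stop an armed player).  The maze is solvable iff the
--     finish lies in either set.
--     """
--     N = len(maze)
--
--     def closure(seeds, passable):
--         seen = set(seeds)
--         work = deque(seeds)
--         while work:
--             r, c = work.popleft()
--             for nr, nc in ((r, c + 1), (r + 1, c), (r, c - 1), (r - 1, c)):
--                 if 0 <= nr < N and 0 <= nc < N and (nr, nc) not in seen \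
--                         and passable(maze[nr][nc]):
--                     seen.add((nr, nc))
--                     work.append((nr, nc))
--         return seen
--
--     # positions reachable while still sword-less
--     no_sword = closure([(0, 0)], lambda cell: cell not in (1, 2, 3))
--     # sword cells adjacent to a sword-less position: where a sword is grabbed
--     sword_seeds = []
--     for r, c in no_sword:
--         for nr, nc in ((r, c + 1), (r + 1, c), (r, c - 1), (r - 1, c)):
--             if 0 <= nr < N and 0 <= nc < N and maze[nr][nc] == 2 \
--                     and (nr, nc) not in sword_seeds:
--                 sword_seeds.append((nr, nc))
--     # positions reachable once armed
--     with_sword = closure(sword_seeds, lambda cell: cell != 1)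
--     finish = (N - 1, N - 1)
--     return finish in no_sword or finish in with_sword
-- ===== Notes on version B (the rewrite author's own statement) =====
-- stated objective: alternative
-- what changed: Replaces the single BFS over 3-D (row, col, have_sword) states by two 2-D flood fills over positions: cells reachable sword-less, then cells reachable after grabbing any reachable sword.
-- outside the precondition, e.g. on check_maze_solvable([[1, 3], [0, 1], [2, 0, 3]]): A returns True, B raises IndexError; on check_maze_solvable([[1, 3, 1, 0], [3, 0], [3, 2, 1, 2], [2, 0, 1, 3]]): A returns False, B returns False
import Mathlib
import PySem

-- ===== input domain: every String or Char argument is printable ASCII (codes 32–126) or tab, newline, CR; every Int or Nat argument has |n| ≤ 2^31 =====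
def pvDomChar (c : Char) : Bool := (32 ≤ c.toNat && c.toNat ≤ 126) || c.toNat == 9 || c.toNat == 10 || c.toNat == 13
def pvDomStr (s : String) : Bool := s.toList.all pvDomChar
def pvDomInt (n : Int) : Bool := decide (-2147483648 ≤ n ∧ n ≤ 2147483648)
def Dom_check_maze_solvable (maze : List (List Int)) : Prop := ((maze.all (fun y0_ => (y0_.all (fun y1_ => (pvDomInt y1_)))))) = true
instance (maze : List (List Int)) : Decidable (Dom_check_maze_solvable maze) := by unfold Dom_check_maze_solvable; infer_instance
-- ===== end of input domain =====

-- B replaces A's BFS over (row, col, have_sword) states by two flood fills over plain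
-- grid positions (sword-less reachability, then reachability from any grabbed sword);
-- objective: alternative (same asymptotic cost, different algorithm).

-- ===== PORT A =====

-- maze[nr][nc]; the defaults are never read under Pre_ (every index is bounds-checked
-- first and Pre_ rules out ragged rows, on which Python raises IndexError)
def pvCell (maze : List (List Int)) (nr nc : Int) : Int :=
  PySem.List.pyGetD (PySem.List.pyGetD maze nr []) nc 0

def pvDirs : List (Int × Int) := [(0, 1), (1, 0), (0, -1), (-1, 0)]

-- the body of A's `for dr, dc in [...]` loop: one direction, updating (queue, visited)
def pvBfsStep (maze : List (List Int)) (N r c : Int) (have_sword : Bool)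
    (acc : List (Int × Int × Bool) × PySem.Set (Int × Int × Bool)) (d : Int × Int) :
    List (Int × Int × Bool) × PySem.Set (Int × Int × Bool) :=
  let nr := r + d.1
  let nc := c + d.2
  if 0 ≤ nr ∧ nr < N ∧ 0 ≤ nc ∧ nc < N then
    let cell := pvCell maze nr nc
    if cell = 1 then acc                                   -- wall: continue
    else
      let new_have_sword := if cell = 2 then true else have_sword
      if cell = 3 ∧ have_sword = false then acc            -- monster, no sword: continue
      else
        let state := (nr, nc, new_have_sword)
        if state ∈ acc.2 then acc
        else (acc.1 ++ [state], PySem.Set.add acc.2 state)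
  else acc

-- A's `while q:` loop; the fuel only makes the recursion total and, under Pre_,
-- never runs out (each pop either came from the initial queue or was a fresh
-- insertion into visited, and visited holds at most 2·N·N in-grid states)
def pvBfsA (maze : List (List Int)) (N : Int) :
    Nat → List (Int × Int × Bool) → PySem.Set (Int × Int × Bool) → Bool
  | 0, _, _ => false
  | _ + 1, [], _ => false
  | fuel + 1, (r, c, have_sword) :: q, visited =>
    if r = N - 1 ∧ c = N - 1 then true
    else
      let p := pvDirs.foldl (pvBfsStep maze N r c have_sword) (q, visited)
      pvBfsA maze N fuel p.1 p.2

def check_maze_solvable (maze : List (List Int)) : Bool :=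
  let N : Int := maze.length
  pvBfsA maze N (2 * maze.length * maze.length + 1) [(0, 0, false)]
    (PySem.Set.add PySem.Set.empty (0, 0, false))

-- ===== PORT B =====

-- the four neighbour positions ((r, c+1), (r+1, c), (r, c-1), (r-1, c))
def pvNbrs (r c : Int) : List (Int × Int) := [(r, c + 1), (r + 1, c), (r, c - 1), (r - 1, c)]

-- body of B's neighbour loop inside `closure`: one candidate, updating (work, seen)
def pvCloStep (maze : List (List Int)) (N : Int) (passable : Int → Bool)
    (acc : List (Int × Int) × PySem.Set (Int × Int)) (p : Int × Int) :
    List (Int × Int) × PySem.Set (Int × Int) :=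
  if 0 ≤ p.1 ∧ p.1 < N ∧ 0 ≤ p.2 ∧ p.2 < N ∧ ¬ p ∈ acc.2 ∧ passable (pvCell maze p.1 p.2) then
    (acc.1 ++ [p], PySem.Set.add acc.2 p)
  else acc

-- B's `closure` worklist; fuel only makes it total and never runs out (each pop is a
-- seed or a fresh insertion into seen, which holds at most N·N in-grid positions)
def pvClosure (maze : List (List Int)) (N : Int) (passable : Int → Bool) :
    Nat → List (Int × Int) → PySem.Set (Int × Int) → PySem.Set (Int × Int)
  | 0, _, seen => seen
  | _ + 1, [], seen => seen
  | fuel + 1, (r, c) :: work, seen =>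
    let p := (pvNbrs r c).foldl (pvCloStep maze N passable) (work, seen)
    pvClosure maze N passable fuel p.1 p.2

-- B's sword-seed collection: sword cells adjacent to a sword-less-reachable position
def pvSwordSeeds (maze : List (List Int)) (N : Int) (no_sword : PySem.Set (Int × Int)) :
    List (Int × Int) :=
  no_sword.foldl (fun acc rc =>
    (pvNbrs rc.1 rc.2).foldl (fun acc2 p =>
      if 0 ≤ p.1 ∧ p.1 < N ∧ 0 ≤ p.2 ∧ p.2 < N ∧ pvCell maze p.1 p.2 = 2 ∧ ¬ p ∈ acc2 then
        acc2 ++ [p]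
      else acc2) acc) []

def check_maze_solvable_alt (maze : List (List Int)) : Bool :=
  let N : Int := maze.length
  let no_sword := pvClosure maze N (fun cell => ¬ (cell = 1 ∨ cell = 2 ∨ cell = 3))
    (maze.length * maze.length + 1) [(0, 0)] (PySem.Set.ofList [(0, 0)])
  let seeds := pvSwordSeeds maze N no_sword
  let with_sword := pvClosure maze N (fun cell => cell ≠ 1)
    (seeds.length + maze.length * maze.length + 1) seeds (PySem.Set.ofList seeds)
  decide ((N - 1, N - 1) ∈ no_sword) || decide ((N - 1, N - 1) ∈ with_sword)

-- ===== PRECONDITION & SPEC =====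
-- Pre_ excludes ragged mazes (a row shorter than the number of rows): there Python A
-- raises IndexError on most inputs, and whether A/B raise or return depends only on
-- which cells each traversal happens to touch (A can even return True where B raises).
def Pre_check_maze_solvable (maze : List (List Int)) : Prop :=
  ∀ row ∈ maze, maze.length ≤ row.length
instance (maze : List (List Int)) : Decidable (Pre_check_maze_solvable maze) := by
  unfold Pre_check_maze_solvable; infer_instance

def pvWitness_check_maze_solvable : List (List Int) := [[0, 2], [3, 0]]

def Spec_check_maze_solvable (maze : List (List Int)) (out : Bool) : Prop :=
  out = check_maze_solvable_alt maze
instance (maze : List (List Int)) (out : Bool) : Decidable (Spec_check_maze_solvable maze out) := by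
  unfold Spec_check_maze_solvable; infer_instance

-- ===== CLAIM (what is proved, stated in full; the proofs are below) =====
def Claim_equal_check_maze_solvable : Prop := ∀ (maze : List (List Int)), Dom_check_maze_solvable maze → Pre_check_maze_solvable maze → Spec_check_maze_solvable maze (check_maze_solvable maze)

-- ===== LEMMAS AND PROOFS =====

-- generic worklist search used to reason about both ports' loops
def pvPush {α : Type} [BEq α] [LawfulBEq α] (acc : List α × PySem.Set α) (t : α) :
    List α × PySem.Set α :=
  if t ∈ acc.2 then acc else (acc.1 ++ [t], PySem.Set.add acc.2 t)

def pvWl {α : Type} [BEq α] [LawfulBEq α] (succs : α → List α) (goal : α → Bool) :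
    Nat → List α → PySem.Set α → Bool × PySem.Set α
  | 0, _, seen => (false, seen)
  | _ + 1, [], seen => (false, seen)
  | fuel + 1, x :: rest, seen =>
    if goal x then (true, seen)
    else
      let p := (succs x).foldl pvPush (rest, seen)
      pvWl succs goal fuel p.1 p.2

-- reachability through successor lists, from a list of sources
def pvCl {α : Type} (succs : α → List α) (I : List α) (x : α) : Prop :=
  ∃ s ∈ I, Relation.ReflTransGen (fun a b => b ∈ succs a) s x


-- ---------- generic facts about pvPush folds ----------

-- a strictly finer Boolean filter is strictly shorter when a point of difference is in the list
theorem pvFilterLt {a : Type} (P : List a) (p q : a → Bool)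
    (hpq : ∀ x, q x = true → p x = true) (t : a) (ht : t ∈ P)
    (h1 : p t = true) (h2 : q t = false) :
    (P.filter q).length < (P.filter p).length := by
  induction P with
  | nil => cases ht
  | cons a P ih =>
    have hmono : (P.filter q).length ≤ (P.filter p).length := by
      rw [← List.countP_eq_length_filter, ← List.countP_eq_length_filter]
      exact List.countP_mono_left (fun x _ hx => hpq x hx)
    rcases List.mem_cons.1 ht with rfl | ha
    · simp only [List.filter_cons, h1, h2]
      simpa using Nat.lt_succ_of_le hmono
    · have h2' := ih ha
      simp only [List.filter_cons]
      by_cases hq2 : q a = true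
      · simpa [hq2, hpq a hq2] using Nat.succ_lt_succ h2'
      · by_cases hp2 : p a = true
        · simp only [Bool.not_eq_true] at hq2
          simp only [hq2, hp2, Bool.false_eq_true, ite_false, ite_true, List.length_cons]
          omega
        · simpa [hq2, hp2] using h2'

theorem pvPush_snd_mem {a : Type} [BEq a] [LawfulBEq a] (L : List a)
    (acc : List a × PySem.Set a) (y : a) :
    y ∈ (L.foldl pvPush acc).2 ↔ y ∈ acc.2 ∨ y ∈ L := by
  induction L generalizing acc with
  | nil => simp
  | cons t L ih =>
    simp only [List.foldl_cons, ih, List.mem_cons]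
    by_cases h : t ∈ acc.2
    · simp only [pvPush, if_pos h]
      constructor
      · rintro (hy | hy)
        · exact Or.inl hy
        · exact Or.inr (Or.inr hy)
      · rintro (hy | rfl | hy)
        · exact Or.inl hy
        · exact Or.inl h
        · exact Or.inr hy
    · simp only [pvPush, if_neg h, PySem.Set.mem_add]
      tauto

theorem pvPush_fst_mem {a : Type} [BEq a] [LawfulBEq a] (L : List a)
    (acc : List a × PySem.Set a) (y : a) (hy : y ∈ (L.foldl pvPush acc).1) :
    y ∈ acc.1 ∨ y ∈ L := by
  induction L generalizing acc with
  | nil => exact Or.inl hy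
  | cons t L ih =>
    simp only [List.foldl_cons] at hy
    rcases ih _ hy with hy' | hy'
    · simp only [pvPush] at hy'
      split at hy'
      · exact Or.inl hy'
      · rcases List.mem_append.1 hy' with h | h
        · exact Or.inl h
        · simp only [List.mem_singleton] at h
          exact Or.inr (h ▸ List.mem_cons_self ..)
    · exact Or.inr (List.mem_cons_of_mem _ hy')

theorem pvPush_fst_sub {a : Type} [BEq a] [LawfulBEq a] (L : List a)
    (acc : List a × PySem.Set a) (y : a) (hy : y ∈ acc.1) :
    y ∈ (L.foldl pvPush acc).1 := by
  induction L generalizing acc with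
  | nil => exact hy
  | cons t L ih =>
    simp only [List.foldl_cons]
    refine ih _ ?_
    simp only [pvPush]
    split
    · exact hy
    · exact List.mem_append.2 (Or.inl hy)

theorem pvPush_fresh {a : Type} [BEq a] [LawfulBEq a] (L : List a)
    (acc : List a × PySem.Set a) (y : a) (hy : y ∈ L) (hns : ¬ y ∈ acc.2) :
    y ∈ (L.foldl pvPush acc).1 := by
  induction L generalizing acc with
  | nil => cases hy
  | cons t L ih =>
    simp only [List.foldl_cons]
    by_cases hyt : y = t
    · subst hyt
      refine pvPush_fst_sub _ _ _ ?_
      simp [pvPush, hns]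
    · rcases List.mem_cons.1 hy with rfl | hyL
      · exact absurd rfl hyt
      · refine ih _ hyL ?_
        simp only [pvPush]
        split
        · exact hns
        · rw [PySem.Set.mem_add]
          rintro (h | h)
          · exact hns h
          · exact hyt h

theorem pvPush_len {a : Type} [BEq a] [LawfulBEq a] (P : List a) (L : List a)
    (hL : ∀ t ∈ L, t ∈ P) (acc : List a × PySem.Set a) :
    (L.foldl pvPush acc).1.length
      + (P.filter (fun t => !decide (t ∈ (L.foldl pvPush acc).2))).length
      ≤ acc.1.length + (P.filter (fun t => !decide (t ∈ acc.2))).length := by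
  induction L generalizing acc with
  | nil => exact le_refl _
  | cons t L ih =>
    simp only [List.foldl_cons]
    refine le_trans (ih (fun u hu => hL u (List.mem_cons_of_mem _ hu)) _) ?_
    by_cases h : t ∈ acc.2
    · simp [pvPush, h]
    · have hlt : (P.filter (fun u => !decide (u ∈ (pvPush acc t).2))).length
          < (P.filter (fun u => !decide (u ∈ acc.2))).length := by
        refine pvFilterLt P _ _ ?_ t (hL t (List.mem_cons_self ..)) ?_ ?_
        · intro x hx
          simp only [pvPush, if_neg h, Bool.not_eq_eq_eq_not, Bool.not_true,
            decide_eq_false_iff_not, PySem.Set.mem_add] at hx ⊢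
          exact fun hmem => hx (Or.inl hmem)
        · simpa using h
        · simp [pvPush, h, PySem.Set.mem_add]
      have hlen : (pvPush acc t).1.length = acc.1.length + 1 := by
        simp [pvPush, h]
      omega

-- ---------- the generic worklist theorem ----------

theorem pvWl_final {a : Type} [BEq a] [LawfulBEq a] (succs : a → List a) (goal : a → Bool)
    (I : List a) (seen : PySem.Set a)
    (hI : ∀ i ∈ I, i ∈ seen)
    (hsound : ∀ x ∈ seen, pvCl succs I x)
    (hcl : ∀ x ∈ seen, goal x = false ∧ ∀ t ∈ succs x, t ∈ seen) :
    (∀ x, (x ∈ seen ↔ pvCl succs I x)) ∧ ¬ ∃ x, pvCl succs I x ∧ goal x = true := by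
  have hreach : ∀ x, pvCl succs I x → x ∈ seen := by
    rintro x ⟨s, hs, hr⟩
    induction hr with
    | refl => exact hI s hs
    | tail _ hstep ih => exact (hcl _ ih).2 _ hstep
  refine ⟨fun x => ⟨fun hx => ?_, hreach x⟩, ?_⟩
  · exact hsound x hx
  · rintro ⟨x, hx, hg⟩
    rw [(hcl x (hreach x hx)).1] at hg
    cases hg

theorem pvWl_spec {a : Type} [BEq a] [LawfulBEq a] (succs : a → List a) (goal : a → Bool)
    (P : List a) (hsuccs : ∀ s : a, ∀ t ∈ succs s, t ∈ P) (I : List a) :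
    ∀ (fuel : Nat) (stack : List a) (seen : PySem.Set a),
      (∀ i ∈ I, i ∈ seen) →
      (∀ x ∈ stack, x ∈ seen) →
      (∀ x ∈ seen, pvCl succs I x) →
      (∀ x ∈ seen, x ∈ stack ∨ (goal x = false ∧ ∀ t ∈ succs x, t ∈ seen)) →
      stack.length + (P.filter (fun t => !decide (t ∈ seen))).length ≤ fuel →
      ((pvWl succs goal fuel stack seen).1 = true ↔ ∃ x, pvCl succs I x ∧ goal x = true) ∧
      ((pvWl succs goal fuel stack seen).1 = false →
        ∀ x, (x ∈ (pvWl succs goal fuel stack seen).2 ↔ pvCl succs I x)) := by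
  intro fuel
  induction fuel with
  | zero =>
    intro stack seen hI hsk hsound hcl hfuel
    have hstack : stack = [] := by
      cases stack with
      | nil => rfl
      | cons x rest => simp at hfuel
    subst hstack
    have hcl' : ∀ x ∈ seen, goal x = false ∧ ∀ t ∈ succs x, t ∈ seen := by
      intro x hx
      rcases hcl x hx with hx' | hx'
      · cases hx'
      · exact hx'
    obtain ⟨hmem, hno⟩ := pvWl_final succs goal I seen hI hsound hcl'
    refine ⟨⟨fun h => absurd h Bool.false_ne_true, fun h => absurd h hno⟩, fun _ => hmem⟩
  | succ fuel ih =>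
    intro stack seen hI hsk hsound hcl hfuel
    cases stack with
    | nil =>
      have hcl' : ∀ x ∈ seen, goal x = false ∧ ∀ t ∈ succs x, t ∈ seen := by
        intro x hx
        rcases hcl x hx with hx' | hx'
        · cases hx'
        · exact hx'
      obtain ⟨hmem, hno⟩ := pvWl_final succs goal I seen hI hsound hcl'
      refine ⟨⟨fun h => absurd h Bool.false_ne_true, fun h => absurd h hno⟩, fun _ => hmem⟩
    | cons x rest =>
      by_cases hg : goal x = true
      · have hx : pvCl succs I x := hsound x (hsk x (List.mem_cons_self ..))
        simp only [pvWl, hg, if_pos]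
        refine ⟨⟨fun _ => ⟨x, hx, hg⟩, fun _ => trivial⟩, fun h => absurd h (by simp)⟩
      · have hxseen : x ∈ seen := hsk x (List.mem_cons_self ..)
        have hxcl : pvCl succs I x := hsound x hxseen
        set p := (succs x).foldl pvPush (rest, seen) with hp
        have hwl : pvWl succs goal (fuel + 1) (x :: rest) seen = pvWl succs goal fuel p.1 p.2 := by
          simp only [pvWl, hg, if_neg]
          rfl
        have hseen2 : ∀ y, y ∈ p.2 ↔ y ∈ seen ∨ y ∈ succs x := fun y => pvPush_snd_mem _ _ y
        have hI' : ∀ i ∈ I, i ∈ p.2 := fun i hi => (hseen2 i).2 (Or.inl (hI i hi))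
        have hsk' : ∀ y ∈ p.1, y ∈ p.2 := by
          intro y hy
          rcases pvPush_fst_mem _ _ y hy with h | h
          · exact (hseen2 y).2 (Or.inl (hsk y (List.mem_cons_of_mem _ h)))
          · exact (hseen2 y).2 (Or.inr h)
        have hsound' : ∀ y ∈ p.2, pvCl succs I y := by
          intro y hy
          rcases (hseen2 y).1 hy with h | h
          · exact hsound y h
          · obtain ⟨s, hs, hr⟩ := hxcl
            exact ⟨s, hs, hr.tail h⟩
        have hcl' : ∀ y ∈ p.2, y ∈ p.1 ∨ (goal y = false ∧ ∀ t ∈ succs y, t ∈ p.2) := by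
          intro y hy
          rcases (hseen2 y).1 hy with h | h
          · rcases hcl y h with h' | h'
            · rcases List.mem_cons.1 h' with rfl | h''
              · exact Or.inr ⟨Bool.eq_false_iff.2 hg, fun t ht => (hseen2 t).2 (Or.inr ht)⟩
              · exact Or.inl (pvPush_fst_sub _ _ y h'')
            · exact Or.inr ⟨h'.1, fun t ht => (hseen2 t).2 (Or.inl (h'.2 t ht))⟩
          · by_cases hys : y ∈ seen
            · rcases hcl y hys with h' | h'
              · rcases List.mem_cons.1 h' with rfl | h''
                · exact Or.inr ⟨Bool.eq_false_iff.2 hg, fun t ht => (hseen2 t).2 (Or.inr ht)⟩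
                · exact Or.inl (pvPush_fst_sub _ _ y h'')
              · exact Or.inr ⟨h'.1, fun t ht => (hseen2 t).2 (Or.inl (h'.2 t ht))⟩
            · exact Or.inl (pvPush_fresh _ _ y h hys)
        have hfuel' : p.1.length + ((P.filter (fun t => !decide (t ∈ p.2))).length) ≤ fuel := by
          have hlen : p.1.length + (P.filter (fun t => !decide (t ∈ p.2))).length
              ≤ rest.length + (P.filter (fun t => !decide (t ∈ seen))).length :=
            pvPush_len P (succs x) (hsuccs x) (rest, seen)
          simp only [List.length_cons] at hfuel
          omega
        have := ih p.1 p.2 hI' hsk' hsound' hcl' hfuel'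
        rw [hwl]
        exact this

theorem pvWl_false_fst {a : Type} [BEq a] [LawfulBEq a] (succs : a → List a) :
    ∀ (fuel : Nat) (stack : List a) (seen : PySem.Set a),
      (pvWl succs (fun _ => false) fuel stack seen).1 = false := by
  intro fuel
  induction fuel with
  | zero => intro stack seen; rfl
  | succ fuel ih =>
    intro stack seen
    cases stack with
    | nil => rfl
    | cons x rest =>
      simp only [pvWl, Bool.false_eq_true, if_neg, ite_false]
      exact ih _ _

-- ---------- bridging port A to the generic worklist ----------

def pvCandA (maze : List (List Int)) (N : Int) (x : Int × Int × Bool) (d : Int × Int) :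
    Option (Int × Int × Bool) :=
  let nr := x.1 + d.1
  let nc := x.2.1 + d.2
  if 0 ≤ nr ∧ nr < N ∧ 0 ≤ nc ∧ nc < N then
    let cell := pvCell maze nr nc
    if cell = 1 then none
    else if cell = 3 ∧ x.2.2 = false then none
    else some (nr, nc, if cell = 2 then true else x.2.2)
  else none

def pvSuccsA (maze : List (List Int)) (N : Int) (x : Int × Int × Bool) :
    List (Int × Int × Bool) :=
  pvDirs.filterMap (pvCandA maze N x)

def pvGoalA (N : Int) (x : Int × Int × Bool) : Bool := decide (x.1 = N - 1 ∧ x.2.1 = N - 1)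

theorem pvBfsStep_eq (maze : List (List Int)) (N r c : Int) (s : Bool)
    (acc : List (Int × Int × Bool) × PySem.Set (Int × Int × Bool)) (d : Int × Int) :
    pvBfsStep maze N r c s acc d =
      match pvCandA maze N (r, c, s) d with
      | none => acc
      | some t => pvPush acc t := by
  unfold pvBfsStep pvCandA
  by_cases h1 : (0 ≤ r + d.1 ∧ r + d.1 < N ∧ 0 ≤ c + d.2 ∧ c + d.2 < N)
  · by_cases h2 : pvCell maze (r + d.1) (c + d.2) = 1
    · simp [h1, h2]
    · by_cases h3 : pvCell maze (r + d.1) (c + d.2) = 3 ∧ s = false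
      · simp [h1, h2, h3]
      · simp only [h1, h2, h3, pvPush, ite_false, if_pos]
        simp
  · simp [h1]

theorem pvBfsA_eq_wl (maze : List (List Int)) (N : Int) :
    ∀ (fuel : Nat) (q : List (Int × Int × Bool)) (seen : PySem.Set (Int × Int × Bool)),
      pvBfsA maze N fuel q seen = (pvWl (pvSuccsA maze N) (pvGoalA N) fuel q seen).1 := by
  intro fuel
  induction fuel with
  | zero => intro q seen; rfl
  | succ fuel ih =>
    intro q seen
    cases q with
    | nil => rfl
    | cons x rest =>
      obtain ⟨r, c, s⟩ := x
      have hfold : pvDirs.foldl (pvBfsStep maze N r c s) (rest, seen)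
          = (pvSuccsA maze N (r, c, s)).foldl pvPush (rest, seen) := by
        rw [pvSuccsA, List.foldl_filterMap]
        congr 1
        funext acc d
        rw [pvBfsStep_eq]
        cases pvCandA maze N (r, c, s) d <;> rfl
      by_cases hg : r = N - 1 ∧ c = N - 1
      · have hgoal : pvGoalA N (r, c, s) = true := by
          simp only [pvGoalA, decide_eq_true_eq]
          exact hg
        simp only [pvBfsA, pvWl]
        rw [if_pos hg, if_pos hgoal]
      · have hgoal : ¬ pvGoalA N (r, c, s) = true := by
          simp only [pvGoalA, decide_eq_true_eq]
          exact hg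
        simp only [pvBfsA, pvWl, if_neg hg, if_neg hgoal]
        rw [hfold]
        exact ih _ _

-- ---------- bridging port B to the generic worklist ----------

def pvCandF (maze : List (List Int)) (N : Int) (passable : Int → Bool) (p : Int × Int) :
    Option (Int × Int) :=
  if 0 ≤ p.1 ∧ p.1 < N ∧ 0 ≤ p.2 ∧ p.2 < N ∧ passable (pvCell maze p.1 p.2) then some p
  else none

def pvSuccsF (maze : List (List Int)) (N : Int) (passable : Int → Bool) (x : Int × Int) :
    List (Int × Int) :=
  (pvNbrs x.1 x.2).filterMap (pvCandF maze N passable)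

theorem pvCloStep_eq (maze : List (List Int)) (N : Int) (passable : Int → Bool)
    (acc : List (Int × Int) × PySem.Set (Int × Int)) (p : Int × Int) :
    pvCloStep maze N passable acc p =
      match pvCandF maze N passable p with
      | none => acc
      | some t => pvPush acc t := by
  simp only [pvCloStep, pvCandF, pvPush]
  by_cases h1 : 0 ≤ p.1 ∧ p.1 < N ∧ 0 ≤ p.2 ∧ p.2 < N ∧ passable (pvCell maze p.1 p.2) = true
  · obtain ⟨a1, a2, a3, a4, a5⟩ := h1
    by_cases h2 : p ∈ acc.2 <;> simp [a1, a2, a3, a4, a5, h2]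
  · rw [if_neg h1, if_neg (by tauto)]

theorem pvClosure_eq_wl (maze : List (List Int)) (N : Int) (passable : Int → Bool) :
    ∀ (fuel : Nat) (work : List (Int × Int)) (seen : PySem.Set (Int × Int)),
      pvClosure maze N passable fuel work seen =
        (pvWl (pvSuccsF maze N passable) (fun _ => false) fuel work seen).2 := by
  intro fuel
  induction fuel with
  | zero => intro work seen; rfl
  | succ fuel ih =>
    intro work seen
    cases work with
    | nil => rfl
    | cons x rest =>
      obtain ⟨r, c⟩ := x
      have hfold : (pvNbrs r c).foldl (pvCloStep maze N passable) (rest, seen)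
          = (pvSuccsF maze N passable (r, c)).foldl pvPush (rest, seen) := by
        rw [pvSuccsF, List.foldl_filterMap]
        congr 1
        funext acc d
        rw [pvCloStep_eq]
        cases pvCandF maze N passable d <;> rfl
      simp only [pvClosure, pvWl, Bool.false_eq_true, if_neg, ite_false]
      rw [hfold]
      exact ih _ _

-- ---------- the finite universes of states / positions ----------

def pvGridSt (N : Int) : List (Int × Int × Bool) :=
  (PySem.List.pyRange 0 N 1).flatMap (fun r =>
    (PySem.List.pyRange 0 N 1).flatMap (fun c => [(r, c, false), (r, c, true)]))

def pvGridP (N : Int) : List (Int × Int) :=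
  (PySem.List.pyRange 0 N 1).flatMap (fun r =>
    (PySem.List.pyRange 0 N 1).flatMap (fun c => [(r, c)]))

theorem pvGridSt_length (n : Nat) : (pvGridSt (n : Int)).length = 2 * n * n := by
  simp only [pvGridSt, List.length_flatMap, List.length_cons, List.length_nil]
  rw [PySem.List.sum_map_const_nat, PySem.List.sum_map_const_nat, PySem.List.length_pyRange_one]
  have h0 : ((n : Int) - 0).toNat = n := by omega
  rw [h0]
  ring

theorem pvGridP_length (n : Nat) : (pvGridP (n : Int)).length = n * n := by
  simp only [pvGridP, List.length_flatMap, List.length_cons, List.length_nil]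
  rw [PySem.List.sum_map_const_nat, PySem.List.sum_map_const_nat, PySem.List.length_pyRange_one]
  have h0 : ((n : Int) - 0).toNat = n := by omega
  rw [h0]
  ring

theorem pvGridSt_mem (N : Int) (x : Int × Int × Bool) :
    x ∈ pvGridSt N ↔ (0 ≤ x.1 ∧ x.1 < N ∧ 0 ≤ x.2.1 ∧ x.2.1 < N) := by
  obtain ⟨r, c, s⟩ := x
  simp only [pvGridSt, List.mem_flatMap, PySem.List.mem_pyRange_one, List.mem_cons,
    List.mem_singleton, List.not_mem_nil, or_false]
  constructor
  · rintro ⟨a, ⟨ha0, haN⟩, b, ⟨hb0, hbN⟩, h | h⟩ <;>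
      (injection h with h1 h2; injection h2 with h2 h3; subst h1; subst h2; exact ⟨ha0, haN, hb0, hbN⟩)
  · rintro ⟨h1, h2, h3, h4⟩
    refine ⟨r, ⟨h1, h2⟩, c, ⟨h3, h4⟩, ?_⟩
    cases s
    · exact Or.inl rfl
    · exact Or.inr rfl

theorem pvGridP_mem (N : Int) (x : Int × Int) :
    x ∈ pvGridP N ↔ (0 ≤ x.1 ∧ x.1 < N ∧ 0 ≤ x.2 ∧ x.2 < N) := by
  obtain ⟨r, c⟩ := x
  simp only [pvGridP, List.mem_flatMap, PySem.List.mem_pyRange_one, List.mem_singleton]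
  constructor
  · rintro ⟨a, ⟨ha0, haN⟩, b, ⟨hb0, hbN⟩, h⟩
    injection h with h1 h2
    subst h1; subst h2
    exact ⟨ha0, haN, hb0, hbN⟩
  · rintro ⟨h1, h2, h3, h4⟩
    exact ⟨r, ⟨h1, h2⟩, c, ⟨h3, h4⟩, rfl⟩

theorem pvSuccsA_sub (maze : List (List Int)) (N : Int) (s t : Int × Int × Bool)
    (ht : t ∈ pvSuccsA maze N s) : t ∈ pvGridSt N := by
  rw [pvGridSt_mem]
  obtain ⟨d, _, hd⟩ := List.mem_filterMap.1 ht
  simp only [pvCandA] at hd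
  split at hd
  · split at hd
    · cases hd
    · split at hd
      · cases hd
      · rename_i hb _ _
        injection hd with hd
        subst hd
        exact ⟨hb.1, hb.2.1, hb.2.2.1, hb.2.2.2⟩
  · cases hd

theorem pvSuccsF_sub (maze : List (List Int)) (N : Int) (passable : Int → Bool)
    (s t : Int × Int) (ht : t ∈ pvSuccsF maze N passable s) : t ∈ pvGridP N := by
  rw [pvGridP_mem]
  obtain ⟨d, _, hd⟩ := List.mem_filterMap.1 ht
  simp only [pvCandF] at hd
  split at hd
  · rename_i hb
    injection hd with hd
    subst hd
    exact ⟨hb.1, hb.2.1, hb.2.2.1, hb.2.2.2.1⟩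
  · cases hd

-- ---------- characterizations of the two ports ----------

theorem pvA_iff (maze : List (List Int)) :
    (check_maze_solvable maze = true) ↔
      ∃ x, pvCl (pvSuccsA maze maze.length) [(0, 0, false)] x ∧
        pvGoalA maze.length x = true := by
  have hrw : check_maze_solvable maze
      = pvBfsA maze (maze.length : Int) (2 * maze.length * maze.length + 1)
          [(0, 0, false)] (PySem.Set.add PySem.Set.empty (0, 0, false)) := rfl
  have hmem0 : ∀ y : Int × Int × Bool,
      y ∈ (PySem.Set.add PySem.Set.empty (0, 0, false)) ↔ y = (0, 0, false) := by
    intro y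
    rw [PySem.Set.mem_add]
    simp [PySem.Set.empty]
  have hspec := pvWl_spec (pvSuccsA maze (maze.length : Int)) (pvGoalA (maze.length : Int))
    (pvGridSt (maze.length : Int)) (fun s t ht => pvSuccsA_sub maze _ s t ht)
    [(0, 0, false)] (2 * maze.length * maze.length + 1) [(0, 0, false)]
    (PySem.Set.add PySem.Set.empty (0, 0, false))
    (by
      intro i hi
      rw [hmem0]
      simpa using hi)
    (by
      intro x hx
      rw [hmem0]
      simpa using hx)
    (by
      intro x hx
      rw [hmem0 x] at hx
      exact ⟨(0, 0, false), List.mem_singleton.2 rfl, hx ▸ Relation.ReflTransGen.refl⟩)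
    (by
      intro x hx
      rw [hmem0 x] at hx
      exact Or.inl (List.mem_singleton.2 hx))
    (by
      have hle := List.length_filter_le
        (fun t => !decide (t ∈ PySem.Set.add PySem.Set.empty ((0 : Int), (0 : Int), false)))
        (pvGridSt (maze.length : Int))
      rw [pvGridSt_length maze.length] at hle
      simp only [List.length_cons, List.length_nil]
      omega)
  rw [hrw, pvBfsA_eq_wl]
  exact hspec.1

theorem pvClosure_mem (maze : List (List Int)) (N : Int) (passable : Int → Bool)
    (seeds : List (Int × Int)) (fuel : Nat)
    (hfuel : seeds.length + (pvGridP N).length ≤ fuel) (x : Int × Int) :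
    x ∈ pvClosure maze N passable fuel seeds (PySem.Set.ofList seeds) ↔
      pvCl (pvSuccsF maze N passable) seeds x := by
  have hspec := pvWl_spec (pvSuccsF maze N passable) (fun _ => false) (pvGridP N)
    (fun s t ht => pvSuccsF_sub maze N passable s t ht) seeds fuel seeds
    (PySem.Set.ofList seeds)
    (fun i hi => (PySem.Set.mem_ofList seeds i).2 hi)
    (fun y hy => (PySem.Set.mem_ofList seeds y).2 hy)
    (fun y hy => ⟨y, (PySem.Set.mem_ofList seeds y).1 hy, Relation.ReflTransGen.refl⟩)
    (fun y hy => Or.inl ((PySem.Set.mem_ofList seeds y).1 hy))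
    (by
      have hle := List.length_filter_le
        (fun t => !decide (t ∈ PySem.Set.ofList seeds)) (pvGridP N)
      omega)
  rw [pvClosure_eq_wl]
  exact hspec.2 (pvWl_false_fst _ _ _ _) x

theorem pvSwordSeeds_mem (maze : List (List Int)) (N : Int)
    (no_sword : PySem.Set (Int × Int)) (p : Int × Int) :
    p ∈ pvSwordSeeds maze N no_sword ↔
      ∃ q ∈ no_sword, p ∈ pvNbrs q.1 q.2 ∧
        (0 ≤ p.1 ∧ p.1 < N ∧ 0 ≤ p.2 ∧ p.2 < N) ∧ pvCell maze p.1 p.2 = 2 := by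
  have hstep : ∀ (acc2 : List (Int × Int)) (t y : Int × Int),
      (y ∈ (if 0 ≤ t.1 ∧ t.1 < N ∧ 0 ≤ t.2 ∧ t.2 < N ∧ pvCell maze t.1 t.2 = 2 ∧ ¬ t ∈ acc2
          then acc2 ++ [t] else acc2))
        ↔ (y ∈ acc2 ∨ (y = t ∧ (0 ≤ t.1 ∧ t.1 < N ∧ 0 ≤ t.2 ∧ t.2 < N) ∧
            pvCell maze t.1 t.2 = 2)) := by
    intro acc2 t y
    split_ifs with h
    · simp only [List.mem_append, List.mem_singleton]
      constructor
      · rintro (hy | rfl)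
        · exact Or.inl hy
        · exact Or.inr ⟨rfl, ⟨h.1, h.2.1, h.2.2.1, h.2.2.2.1⟩, h.2.2.2.2.1⟩
      · rintro (hy | ⟨rfl, _⟩)
        · exact Or.inl hy
        · exact Or.inr rfl
    · constructor
      · exact Or.inl
      · rintro (hy | ⟨rfl, hb, hc⟩)
        · exact hy
        · by_cases hmem : y ∈ acc2
          · exact hmem
          · exact absurd ⟨hb.1, hb.2.1, hb.2.2.1, hb.2.2.2, hc, hmem⟩ h
  have hinner : ∀ (L : List (Int × Int)) (acc2 : List (Int × Int)) (y : Int × Int),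
      (y ∈ L.foldl (fun acc2 p =>
          if 0 ≤ p.1 ∧ p.1 < N ∧ 0 ≤ p.2 ∧ p.2 < N ∧ pvCell maze p.1 p.2 = 2 ∧ ¬ p ∈ acc2
          then acc2 ++ [p] else acc2) acc2)
        ↔ (y ∈ acc2 ∨ (∃ t ∈ L, y = t ∧ (0 ≤ t.1 ∧ t.1 < N ∧ 0 ≤ t.2 ∧ t.2 < N) ∧
            pvCell maze t.1 t.2 = 2)) := by
    intro L
    induction L with
    | nil => simp
    | cons t L ih =>
      intro acc2 y
      simp only [List.foldl_cons, ih, hstep, List.mem_cons]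
      constructor
      · rintro ((hy | hy) | ⟨u, hu, hy⟩)
        · exact Or.inl hy
        · exact Or.inr ⟨t, Or.inl rfl, hy⟩
        · exact Or.inr ⟨u, Or.inr hu, hy⟩
      · rintro (hy | ⟨u, hu | hu, hy⟩)
        · exact Or.inl (Or.inl hy)
        · exact Or.inl (Or.inr (hu ▸ hy))
        · exact Or.inr ⟨u, hu, hy⟩
  have houter : ∀ (L : List (Int × Int)) (acc : List (Int × Int)) (y : Int × Int),
      (y ∈ L.foldl (fun acc rc =>
          (pvNbrs rc.1 rc.2).foldl (fun acc2 p =>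
            if 0 ≤ p.1 ∧ p.1 < N ∧ 0 ≤ p.2 ∧ p.2 < N ∧ pvCell maze p.1 p.2 = 2 ∧ ¬ p ∈ acc2
            then acc2 ++ [p] else acc2) acc) acc)
        ↔ (y ∈ acc ∨ (∃ q ∈ L, y ∈ pvNbrs q.1 q.2 ∧
            (0 ≤ y.1 ∧ y.1 < N ∧ 0 ≤ y.2 ∧ y.2 < N) ∧ pvCell maze y.1 y.2 = 2)) := by
    intro L
    induction L with
    | nil => simp
    | cons q L ih =>
      intro acc y
      simp only [List.foldl_cons, ih, hinner, List.mem_cons]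
      constructor
      · rintro ((hy | ⟨t, ht, rfl, hb, hc⟩) | ⟨u, hu, hy⟩)
        · exact Or.inl hy
        · exact Or.inr ⟨q, Or.inl rfl, ht, hb, hc⟩
        · exact Or.inr ⟨u, Or.inr hu, hy⟩
      · rintro (hy | ⟨u, hu | hu, hn, hb, hc⟩)
        · exact Or.inl (Or.inl hy)
        · exact Or.inl (Or.inr ⟨y, hu ▸ hn, rfl, hb, hc⟩)
        · exact Or.inr ⟨u, hu, hn, hb, hc⟩
  have := houter no_sword [] p
  simp only [List.not_mem_nil, false_or] at this
  exact this

-- ---------- the two layers of the state graph ----------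

def pvInb (N : Int) (p : Int × Int) : Prop := 0 ≤ p.1 ∧ p.1 < N ∧ 0 ≤ p.2 ∧ p.2 < N

def pvPassF (cell : Int) : Bool := ¬ (cell = 1 ∨ cell = 2 ∨ cell = 3)
def pvPassT (cell : Int) : Bool := cell ≠ 1

def pvF (maze : List (List Int)) (p : Int × Int) : Prop :=
  pvCl (pvSuccsF maze maze.length pvPassF) [(0, 0)] p

def pvS (maze : List (List Int)) (p : Int × Int) : Prop :=
  pvInb maze.length p ∧ pvCell maze p.1 p.2 = 2 ∧
    ∃ q, pvF maze q ∧ p ∈ pvNbrs q.1 q.2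

def pvT (maze : List (List Int)) (p : Int × Int) : Prop :=
  ∃ s, pvS maze s ∧
    Relation.ReflTransGen (fun a b => b ∈ pvSuccsF maze maze.length pvPassT a) s p

theorem pvNbrs_iff (r c a b : Int) :
    (a, b) ∈ pvNbrs r c ↔ ∃ d ∈ pvDirs, a = r + d.1 ∧ b = c + d.2 := by
  constructor
  · intro h
    simp only [pvNbrs, List.mem_cons, List.not_mem_nil, or_false, Prod.mk.injEq] at h
    rcases h with ⟨rfl, rfl⟩ | ⟨rfl, rfl⟩ | ⟨rfl, rfl⟩ | ⟨rfl, rfl⟩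
    · refine ⟨(0, 1), by simp [pvDirs], ?_, ?_⟩ <;> simp
    · refine ⟨(1, 0), by simp [pvDirs], ?_, ?_⟩ <;> simp
    · refine ⟨(0, -1), by simp [pvDirs], ?_, ?_⟩ <;> (simp; try omega)
    · refine ⟨(-1, 0), by simp [pvDirs], ?_, ?_⟩ <;> (simp; try omega)
  · rintro ⟨d, hd, rfl, rfl⟩
    simp only [pvDirs, List.mem_cons, List.not_mem_nil, or_false] at hd
    rcases hd with rfl | rfl | rfl | rfl <;>
      (simp [pvNbrs, Prod.ext_iff]; try omega)

theorem pvCandA_eq_some (maze : List (List Int)) (N r c : Int) (s : Bool) (d : Int × Int)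
    (t : Int × Int × Bool) :
    pvCandA maze N (r, c, s) d = some t ↔
      (t.1 = r + d.1 ∧ t.2.1 = c + d.2 ∧ pvInb N (t.1, t.2.1) ∧
        pvCell maze t.1 t.2.1 ≠ 1 ∧ ¬ (pvCell maze t.1 t.2.1 = 3 ∧ s = false) ∧
        t.2.2 = (if pvCell maze t.1 t.2.1 = 2 then true else s)) := by
  obtain ⟨a, b2, s2⟩ := t
  by_cases h1 : 0 ≤ r + d.1 ∧ r + d.1 < N ∧ 0 ≤ c + d.2 ∧ c + d.2 < N
  · by_cases h2 : pvCell maze (r + d.1) (c + d.2) = 1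
    · constructor
      · intro h
        exfalso
        simp [pvCandA, h1, h2] at h
      · rintro ⟨rfl, rfl, -, hcell, -, -⟩
        exact absurd h2 hcell
    · by_cases h3 : pvCell maze (r + d.1) (c + d.2) = 3 ∧ s = false
      · constructor
        · intro h
          exfalso
          simp [pvCandA, h1, h2, h3] at h
        · rintro ⟨rfl, rfl, -, -, hno, -⟩
          exact absurd h3 hno
      · have hsome : pvCandA maze N (r, c, s) d
            = some (r + d.1, c + d.2,
                if pvCell maze (r + d.1) (c + d.2) = 2 then true else s) := by
          simp [pvCandA, h1, h2, h3]
        rw [hsome]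
        simp only [Option.some.injEq, Prod.mk.injEq]
        constructor
        · rintro ⟨rfl, rfl, rfl⟩
          exact ⟨rfl, rfl, h1, h2, h3, rfl⟩
        · rintro ⟨rfl, rfl, -, -, -, h6⟩
          exact ⟨rfl, rfl, h6.symm⟩
  · constructor
    · intro h
      exfalso
      simp [pvCandA, h1] at h
    · rintro ⟨rfl, rfl, hinb, -, -, -⟩
      exact absurd hinb h1

theorem pvMem_succsA (maze : List (List Int)) (N r c a b : Int) (s s' : Bool) :
    (a, b, s') ∈ pvSuccsA maze N (r, c, s) ↔
      ((a, b) ∈ pvNbrs r c ∧ pvInb N (a, b) ∧ pvCell maze a b ≠ 1 ∧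
        ¬ (pvCell maze a b = 3 ∧ s = false) ∧
        s' = (if pvCell maze a b = 2 then true else s)) := by
  rw [pvSuccsA, List.mem_filterMap]
  constructor
  · rintro ⟨d, hd, hc⟩
    rw [pvCandA_eq_some] at hc
    obtain ⟨h1, h2, h3, h4, h5, h6⟩ := hc
    refine ⟨?_, h3, h4, h5, h6⟩
    rw [pvNbrs_iff]
    exact ⟨d, hd, h1, h2⟩
  · rintro ⟨hn, h3, h4, h5, h6⟩
    rw [pvNbrs_iff] at hn
    obtain ⟨d, hd, h1, h2⟩ := hn
    exact ⟨d, hd, (pvCandA_eq_some maze N r c s d (a, b, s')).2 ⟨h1, h2, h3, h4, h5, h6⟩⟩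

theorem pvMem_succsF (maze : List (List Int)) (N : Int) (passable : Int → Bool)
    (q p : Int × Int) :
    p ∈ pvSuccsF maze N passable q ↔
      (p ∈ pvNbrs q.1 q.2 ∧ pvInb N p ∧ passable (pvCell maze p.1 p.2) = true) := by
  rw [pvSuccsF, List.mem_filterMap]
  constructor
  · rintro ⟨u, hu, hc⟩
    simp only [pvCandF] at hc
    split at hc
    · rename_i hcond
      injection hc with hc
      subst hc
      exact ⟨hu, ⟨hcond.1, hcond.2.1, hcond.2.2.1, hcond.2.2.2.1⟩, hcond.2.2.2.2⟩
    · cases hc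
  · rintro ⟨hn, hb, hp⟩
    refine ⟨p, hn, ?_⟩
    simp only [pvCandF]
    rw [if_pos ⟨hb.1, hb.2.1, hb.2.2.1, hb.2.2.2, hp⟩]

-- layering: A-reachability of (p, false) is pvF, of (p, true) is pvT
theorem pvLayer_fwd (maze : List (List Int)) (x : Int × Int × Bool)
    (h : pvCl (pvSuccsA maze maze.length) [(0, 0, false)] x) :
    (x.2.2 = false → pvF maze (x.1, x.2.1)) ∧ (x.2.2 = true → pvT maze (x.1, x.2.1)) := by
  obtain ⟨s0, hs0, hr⟩ := h
  simp only [List.mem_singleton] at hs0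
  subst hs0
  induction hr with
  | refl =>
    refine ⟨fun _ => ⟨(0, 0), List.mem_singleton.2 rfl, Relation.ReflTransGen.refl⟩, fun h => ?_⟩
    cases h
  | tail hr hstep ih =>
    rename_i y z
    obtain ⟨yr, yc, ys⟩ := y
    obtain ⟨zr, zc, zs⟩ := z
    rw [pvMem_succsA] at hstep
    obtain ⟨hadj, hinb, h1, h3, hz⟩ := hstep
    cases ys with
    | false =>
      have hF : pvF maze (yr, yc) := ih.1 rfl
      have hc3 : pvCell maze zr zc ≠ 3 := fun hc => h3 ⟨hc, rfl⟩
      by_cases hc2 : pvCell maze zr zc = 2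
      · have hzs : zs = true := by
          rw [hz, if_pos hc2]
        subst hzs
        refine ⟨fun h => Bool.noConfusion h, fun _ => ?_⟩
        exact ⟨(zr, zc), ⟨hinb, hc2, (yr, yc), hF, hadj⟩, Relation.ReflTransGen.refl⟩
      · have hzs : zs = false := by
          rw [hz, if_neg hc2]
        subst hzs
        refine ⟨fun _ => ?_, fun h => Bool.noConfusion h⟩
        obtain ⟨q, hq, hrq⟩ := hF
        refine ⟨q, hq, hrq.tail ?_⟩
        rw [pvMem_succsF]
        refine ⟨hadj, hinb, ?_⟩
        simp [pvPassF, h1, hc2, hc3]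
    | true =>
      have hT : pvT maze (yr, yc) := ih.2 rfl
      have hzs : zs = true := by
        rw [hz]
        split <;> rfl
      subst hzs
      refine ⟨fun h => Bool.noConfusion h, fun _ => ?_⟩
      obtain ⟨sd, hS, hrT⟩ := hT
      refine ⟨sd, hS, hrT.tail ?_⟩
      rw [pvMem_succsF]
      refine ⟨hadj, hinb, ?_⟩
      simp [pvPassT, h1]

theorem pvLayer_F (maze : List (List Int)) (p : Int × Int) (h : pvF maze p) :
    pvCl (pvSuccsA maze maze.length) [(0, 0, false)] (p.1, p.2, false) := by
  obtain ⟨q, hq, hr⟩ := h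
  simp only [List.mem_singleton] at hq
  subst hq
  induction hr with
  | refl => exact ⟨(0, 0, false), List.mem_singleton.2 rfl, Relation.ReflTransGen.refl⟩
  | tail hr hstep ih =>
    rename_i y z
    obtain ⟨yr, yc⟩ := y
    obtain ⟨zr, zc⟩ := z
    rw [pvMem_succsF] at hstep
    obtain ⟨hadj, hinb, hpass⟩ := hstep
    simp only [pvPassF, decide_eq_true_eq] at hpass
    push_neg at hpass
    obtain ⟨h1, h2, h3⟩ := hpass
    obtain ⟨w, hw, hrw⟩ := ih
    refine ⟨w, hw, hrw.tail ?_⟩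
    rw [pvMem_succsA]
    exact ⟨hadj, hinb, h1, fun hc => h3 hc.1, by rw [if_neg h2]⟩

theorem pvLayer_T (maze : List (List Int)) (p : Int × Int) (h : pvT maze p) :
    pvCl (pvSuccsA maze maze.length) [(0, 0, false)] (p.1, p.2, true) := by
  obtain ⟨sd, ⟨hinb, hc2, q, hFq, hadj⟩, hr⟩ := h
  have hq : pvCl (pvSuccsA maze maze.length) [(0, 0, false)] (q.1, q.2, false) :=
    pvLayer_F maze q hFq
  have hsd : pvCl (pvSuccsA maze maze.length) [(0, 0, false)] (sd.1, sd.2, true) := by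
    obtain ⟨w, hw, hrw⟩ := hq
    refine ⟨w, hw, hrw.tail ?_⟩
    have : ((sd.1, sd.2, true) : Int × Int × Bool) = (sd.1, sd.2, true) := rfl
    rw [pvMem_succsA]
    refine ⟨?_, ?_, ?_, ?_, ?_⟩
    · simpa using hadj
    · simpa using hinb
    · rw [hc2]
      norm_num
    · rintro ⟨hc, -⟩
      rw [hc2] at hc
      norm_num at hc
    · rw [if_pos hc2]
  clear hFq hq hadj hinb hc2
  induction hr with
  | refl => exact hsd
  | tail hr hstep ih =>
    rename_i y z
    obtain ⟨yr, yc⟩ := y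
    obtain ⟨zr, zc⟩ := z
    rw [pvMem_succsF] at hstep
    obtain ⟨hadj, hinb, hpass⟩ := hstep
    simp only [pvPassT, decide_eq_true_eq] at hpass
    obtain ⟨w, hw, hrw⟩ := ih
    refine ⟨w, hw, hrw.tail ?_⟩
    rw [pvMem_succsA]
    refine ⟨hadj, hinb, hpass, ?_, ?_⟩
    · rintro ⟨-, h⟩
      cases h
    · split <;> rfl

theorem pvB_iff (maze : List (List Int)) :
    (check_maze_solvable_alt maze = true) ↔
      (pvF maze ((maze.length : Int) - 1, (maze.length : Int) - 1) ∨
       pvT maze ((maze.length : Int) - 1, (maze.length : Int) - 1)) := by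
  have hF : ∀ x, (x ∈ pvClosure maze (maze.length : Int) pvPassF
      (maze.length * maze.length + 1) [(0, 0)] (PySem.Set.ofList [(0, 0)])) ↔ pvF maze x := by
    intro x
    rw [pvClosure_mem maze (maze.length : Int) pvPassF [(0, 0)] (maze.length * maze.length + 1)
      (by
        rw [pvGridP_length maze.length]
        simp only [List.length_cons, List.length_nil]
        omega)]
    exact Iff.rfl
  have hSmem : ∀ s, (s ∈ pvSwordSeeds maze (maze.length : Int)
      (pvClosure maze (maze.length : Int) pvPassF (maze.length * maze.length + 1) [(0, 0)]
        (PySem.Set.ofList [(0, 0)]))) ↔ pvS maze s := by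
    intro s
    rw [pvSwordSeeds_mem]
    constructor
    · rintro ⟨q, hq, hn, hb, hc⟩
      exact ⟨hb, hc, q, (hF q).1 hq, hn⟩
    · rintro ⟨hb, hc, q, hFq, hn⟩
      exact ⟨q, (hF q).2 hFq, hn, hb, hc⟩
  have hT : ∀ (x : Int × Int),
      (x ∈ pvClosure maze (maze.length : Int) pvPassT
        ((pvSwordSeeds maze (maze.length : Int)
            (pvClosure maze (maze.length : Int) pvPassF (maze.length * maze.length + 1) [(0, 0)]
              (PySem.Set.ofList [(0, 0)]))).length + maze.length * maze.length + 1)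
        (pvSwordSeeds maze (maze.length : Int)
          (pvClosure maze (maze.length : Int) pvPassF (maze.length * maze.length + 1) [(0, 0)]
            (PySem.Set.ofList [(0, 0)])))
        (PySem.Set.ofList (pvSwordSeeds maze (maze.length : Int)
          (pvClosure maze (maze.length : Int) pvPassF (maze.length * maze.length + 1) [(0, 0)]
            (PySem.Set.ofList [(0, 0)]))))) ↔ pvT maze x := by
    intro x
    rw [pvClosure_mem maze (maze.length : Int) pvPassT _ _
      (by
        rw [pvGridP_length maze.length]
        omega)]
    constructor
    · rintro ⟨s, hs, hr⟩
      exact ⟨s, (hSmem s).1 hs, hr⟩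
    · rintro ⟨s, hs, hr⟩
      exact ⟨s, (hSmem s).2 hs, hr⟩
  have hrw : check_maze_solvable_alt maze = true ↔
      ((((maze.length : Int) - 1, (maze.length : Int) - 1) ∈ pvClosure maze (maze.length : Int)
          pvPassF (maze.length * maze.length + 1) [(0, 0)] (PySem.Set.ofList [(0, 0)])) ∨
       (((maze.length : Int) - 1, (maze.length : Int) - 1) ∈ pvClosure maze (maze.length : Int)
          pvPassT ((pvSwordSeeds maze (maze.length : Int)
              (pvClosure maze (maze.length : Int) pvPassF (maze.length * maze.length + 1) [(0, 0)]
                (PySem.Set.ofList [(0, 0)]))).length + maze.length * maze.length + 1)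
          (pvSwordSeeds maze (maze.length : Int)
            (pvClosure maze (maze.length : Int) pvPassF (maze.length * maze.length + 1) [(0, 0)]
              (PySem.Set.ofList [(0, 0)])))
          (PySem.Set.ofList (pvSwordSeeds maze (maze.length : Int)
            (pvClosure maze (maze.length : Int) pvPassF (maze.length * maze.length + 1) [(0, 0)]
              (PySem.Set.ofList [(0, 0)])))))) := by
    show ((decide _ || decide _) = true) ↔ _
    simp only [Bool.or_eq_true, decide_eq_true_eq]
    exact Iff.rfl
  rw [hrw, hF, hT]

-- ===== VERDICT (by name: the statement is the Claim_ definition above) =====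
theorem check_maze_solvable_spec : Claim_equal_check_maze_solvable := by
  unfold Claim_equal_check_maze_solvable
  intro maze _ _
  unfold Spec_check_maze_solvable
  have hA := pvA_iff maze
  have hB := pvB_iff maze
  have hiff : check_maze_solvable maze = true ↔ check_maze_solvable_alt maze = true := by
    rw [hA, hB]
    constructor
    · rintro ⟨⟨xr, xc, xs⟩, hcl, hg⟩
      simp only [pvGoalA, decide_eq_true_eq] at hg
      obtain ⟨rfl, rfl⟩ := hg
      have hl := pvLayer_fwd maze _ hcl
      cases xs
      · exact Or.inl (hl.1 rfl)
      · exact Or.inr (hl.2 rfl)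
    · rintro (hF | hT)
      · refine ⟨((maze.length : Int) - 1, (maze.length : Int) - 1, false),
          pvLayer_F maze _ hF, ?_⟩
        simp [pvGoalA]
      · refine ⟨((maze.length : Int) - 1, (maze.length : Int) - 1, true),
          pvLayer_T maze _ hT, ?_⟩
        simp [pvGoalA]
  cases h1 : check_maze_solvable maze <;> cases h2 : check_maze_solvable_alt maze <;> simp_all
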